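-- pv_equiv track=rewrite | github.com/hansie4/hans-aoc | 2023/Day 18/main.py | toGrid
-- ===== SOURCE A (Python) =====
-- def getBounds(listOfPoints: set):
--     minX = float("inf")
--     minY = float("inf")
--     maxX = float("-inf")
--     maxY = float("-inf")
--
--     for x in listOfPoints:
--         if x[0] < minX:
--             minX = x[0]
--         if x[0] > maxX:
--             maxX = x[0]
--         if x[1] < minY:
--             minY = x[1]
--         if x[1] > maxY:
--             maxY = x[1]
--
--     return (minX, maxX), (minY, maxY)
--
-- def pointsToDict(points: set):
--     d = dict()
--
--     for x in points:
--         d[(x[0], x[1])] = x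
--
--     return d
--
-- def toGrid(points: set):
--     grid = list()
--     pDict = pointsToDict(points)
--
--     xBounds, yBounds = getBounds(points)
--     xOffset = abs(xBounds[0])
--     yOffset = abs(yBounds[0])
--
--     for y in range(0, yBounds[1] + yOffset + 1, 1):
--         newRow = []
--         for x in range(0, xBounds[1] + xOffset + 1, 1):
--             if (x - xOffset, y - yOffset) in pDict:
--                 newRow.append("#")
--             else:
--                 newRow.append(".")
--         grid.append(newRow)
--
--     return grid
-- ===== SOURCE B (Python) =====
-- def toGrid(points: set):
--     minX = min(p[0] for p in points)
--     maxX = max(p[0] for p in points)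
--     minY = min(p[1] for p in points)
--     maxY = max(p[1] for p in points)
--     xOffset = abs(minX)
--     yOffset = abs(minY)
--     grid = [["."] * (maxX + xOffset + 1) for _ in range(maxY + yOffset + 1)]
--     for p in points:
--         grid[p[1] + yOffset][p[0] + xOffset] = "#"
--     return grid
-- ===== Notes on version B (the rewrite author's own statement) =====
-- stated objective: simpler
-- what changed: B computes the bounds with min/max, allocates the whole grid of '.' rows up front and writes '#' directly at each point's cell, instead of building a dict of the points and testing every grid cell for membership.
import Mathlib
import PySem

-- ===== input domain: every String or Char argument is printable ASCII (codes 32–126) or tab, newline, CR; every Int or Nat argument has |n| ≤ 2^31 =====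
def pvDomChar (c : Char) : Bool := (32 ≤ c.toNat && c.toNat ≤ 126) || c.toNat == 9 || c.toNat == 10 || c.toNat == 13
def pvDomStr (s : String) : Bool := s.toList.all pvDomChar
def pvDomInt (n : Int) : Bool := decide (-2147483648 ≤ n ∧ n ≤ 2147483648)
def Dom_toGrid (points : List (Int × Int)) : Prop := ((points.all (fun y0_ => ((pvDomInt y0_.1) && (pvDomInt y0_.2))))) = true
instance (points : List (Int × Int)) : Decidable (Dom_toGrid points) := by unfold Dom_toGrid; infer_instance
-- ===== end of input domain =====

-- B renders the points directly into a pre-allocated grid instead of A's dict + per-cell membership scan.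
-- Both programs raise on the empty point set (A: TypeError from range(nan), B: ValueError from min), hence Pre_.

-- ===== PORT A =====
def updMinA (o : Option Int) (v : Int) : Option Int :=
  match o with
  | none => some v          -- v < inf
  | some m => if v < m then some v else some m

def updMaxA (o : Option Int) (v : Int) : Option Int :=
  match o with
  | none => some v          -- v > -inf
  | some m => if m < v then some v else some m

-- getBounds: the float ±inf sentinels become `none` (any value beats them)
def getBoundsA (pts : List (Int × Int)) : (Option Int × Option Int) × (Option Int × Option Int) :=
  pts.foldl (fun b x =>
    ((updMinA b.1.1 x.1, updMaxA b.1.2 x.1), (updMinA b.2.1 x.2, updMaxA b.2.2 x.2)))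
    ((none, none), (none, none))

def pointsToDictA (pts : List (Int × Int)) : PySem.Dict (Int × Int) (Int × Int) :=
  pts.foldl (fun d x => d.insert (x.1, x.2) x) PySem.Dict.empty

def toGrid (points : List (Int × Int)) : List (List String) :=
  let pDict := pointsToDictA points
  match getBoundsA points with
  | ((some minX, some maxX), (some minY, some maxY)) =>
    let xOffset := |minX|
    let yOffset := |minY|
    (PySem.List.pyRange 0 (maxY + yOffset + 1) 1).foldl (fun grid y =>
      grid ++ [(PySem.List.pyRange 0 (maxX + xOffset + 1) 1).foldl (fun newRow x =>
        newRow ++ [if pDict.contains (x - xOffset, y - yOffset) then "#" else "."]) []]) []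
  | _ => []   -- empty input: the Python raises here (excluded by Pre_toGrid)

-- ===== PORT B =====
def toGrid_alt (points : List (Int × Int)) : List (List String) :=
  if points.isEmpty then []   -- Source B's min raises on the empty list (excluded by Pre_toGrid)
  else
    let minX := (PySem.List.min? (points.map Prod.fst) id).getD 0
    let maxX := (PySem.List.max? (points.map Prod.fst) id).getD 0
    let minY := (PySem.List.min? (points.map Prod.snd) id).getD 0
    let maxY := (PySem.List.max? (points.map Prod.snd) id).getD 0
    let xOffset := |minX|
    let yOffset := |minY|
    let init := List.replicate (maxY + yOffset + 1).toNat (List.replicate (maxX + xOffset + 1).toNat ".")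
    points.foldl (fun g p =>
      g.modify (p.2 + yOffset).toNat (fun row => row.set (p.1 + xOffset).toNat "#")) init

-- ===== PRECONDITION & SPEC =====
-- Pre_ excludes only the empty list, on which A raises TypeError (and B raises ValueError).
def Pre_toGrid (points : List (Int × Int)) : Prop := points ≠ []
instance (points : List (Int × Int)) : Decidable (Pre_toGrid points) := by unfold Pre_toGrid; infer_instance
def pvWitness_toGrid : (List (Int × Int)) := [((1 : Int), (-1 : Int)), ((0 : Int), (2 : Int))]

def Spec_toGrid (points : List (Int × Int)) (out : List (List String)) : Prop := out = toGrid_alt points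
instance (points : List (Int × Int)) (out : List (List String)) : Decidable (Spec_toGrid points out) := by unfold Spec_toGrid; infer_instance

-- ===== CLAIM (what is proved, stated in full; the proofs are below) =====
def Claim_equal_toGrid : Prop := ∀ (points : List (Int × Int)), Dom_toGrid points → Pre_toGrid points → Spec_toGrid points (toGrid points)

-- ===== LEMMAS AND PROOFS =====

-- the common normal form both grids are reduced to
def gridOf (H W : Nat) (q : Nat → Nat → Bool) : List (List String) :=
  (List.range H).map (fun y => (List.range W).map (fun x => if q y x then "#" else "."))

lemma foldl_updMinA_some (l : List Int) (m : Int) :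
    l.foldl updMinA (some m) = some (l.foldl min m) := by
  induction l generalizing m with
  | nil => rfl
  | cons a t ih =>
      simp only [List.foldl_cons, updMinA]
      split
      · next h => have hmin : min m a = a := by omega
                  rw [hmin, ih]
      · next h => have hmin : min m a = m := by omega
                  rw [hmin, ih]

lemma foldl_updMaxA_some (l : List Int) (m : Int) :
    l.foldl updMaxA (some m) = some (l.foldl max m) := by
  induction l generalizing m with
  | nil => rfl
  | cons a t ih =>
      simp only [List.foldl_cons, updMaxA]
      split
      · next h => have hmax : max m a = a := by omega
                  rw [hmax, ih]
      · next h => have hmax : max m a = m := by omega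
                  rw [hmax, ih]

lemma getBoundsA_split (pts : List (Int × Int)) (b : (Option Int × Option Int) × (Option Int × Option Int)) :
    pts.foldl (fun b x =>
      ((updMinA b.1.1 x.1, updMaxA b.1.2 x.1), (updMinA b.2.1 x.2, updMaxA b.2.2 x.2))) b
    = (((pts.map Prod.fst).foldl updMinA b.1.1, (pts.map Prod.fst).foldl updMaxA b.1.2),
       ((pts.map Prod.snd).foldl updMinA b.2.1, (pts.map Prod.snd).foldl updMaxA b.2.2)) := by
  induction pts generalizing b with
  | nil => rfl
  | cons p t ih => simp only [List.foldl_cons, List.map_cons, ih]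

lemma min?_eq_foldl_updMinA (l : List Int) :
    PySem.List.min? l id = l.foldl updMinA none := by
  unfold PySem.List.min?
  congr 1
  funext o v
  cases o <;> rfl

lemma max?_eq_foldl_updMaxA (l : List Int) :
    PySem.List.max? l id = l.foldl updMaxA none := by
  unfold PySem.List.max?
  congr 1
  funext o v
  cases o <;> rfl

lemma dict_contains_foldl (pts : List (Int × Int)) (d : PySem.Dict (Int × Int) (Int × Int)) (k : Int × Int) :
    (pts.foldl (fun d x => d.insert (x.1, x.2) x) d).contains k
      = (decide (k ∈ pts) || d.contains k) := by
  induction pts generalizing d with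
  | nil => simp
  | cons p t ih =>
      simp only [List.foldl_cons, ih, List.mem_cons]
      rw [PySem.Dict.contains_eq_isSome_get?, PySem.Dict.get?_insert]
      rcases eq_or_ne k (p.1, p.2) with h | h
      · simp [h]
      · rw [if_neg h, ← PySem.Dict.contains_eq_isSome_get?]
        have : (k = p) = False := by
          simp only [eq_iff_iff, iff_false]
          intro hk; exact h (by simp [hk])
        simp [this]

lemma foldl_min_le_init (l : List Int) (a : Int) : l.foldl min a ≤ a := by
  induction l generalizing a with
  | nil => exact le_refl a
  | cons b t ih => exact le_trans (ih (min a b)) (min_le_left _ _)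

lemma foldl_min_le_of_mem (l : List Int) (a x : Int) (h : x ∈ l) : l.foldl min a ≤ x := by
  induction l generalizing a with
  | nil => cases h
  | cons b t ih =>
      rcases List.mem_cons.mp h with rfl | h
      · calc t.foldl min (min a x) ≤ min a x := foldl_min_le_init t _
          _ ≤ x := min_le_right _ _
      · exact ih _ h

lemma le_foldl_max_of_mem (l : List Int) (a x : Int) (h : x ∈ l) : x ≤ l.foldl max a :=
  (PySem.List.le_foldl_max l a).2 x h

lemma init_le_foldl_max (l : List Int) (a : Int) : a ≤ l.foldl max a :=
  (PySem.List.le_foldl_max l a).1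

-- A's double append-loop is gridOf
lemma toGridA_eq_gridOf (pts : List (Int × Int)) (mX MX mY MY : Int)
    (hb : getBoundsA pts = ((some mX, some MX), (some mY, some MY)))
    (H W : Nat) (hH : MY + |mY| + 1 = (H : Int)) (hW : MX + |mX| + 1 = (W : Int)) :
    toGrid pts = gridOf H W (fun y x =>
      (pointsToDictA pts).contains ((x : Int) - |mX|, (y : Int) - |mY|)) := by
  unfold toGrid
  rw [hb]
  simp only [hH, hW, PySem.List.pyRange_zero_natCast, gridOf]
  rw [PySem.List.foldl_append_singleton_eq_map, List.nil_append, List.map_map]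
  refine List.map_congr_left (fun y _ => ?_)
  rw [Function.comp_apply, PySem.List.foldl_append_singleton_eq_map, List.nil_append, List.map_map]
  rfl

lemma replicate_eq_gridOf (H W : Nat) :
    List.replicate H (List.replicate W ("." : String)) = gridOf H W (fun _ _ => false) := by
  unfold gridOf
  apply List.ext_getElem <;> simp

lemma mark_gridOf (H W : Nat) (q : Nat → Nat → Bool) (i j : Nat) (_hi : i < H) (_hj : j < W) :
    (gridOf H W q).modify i (fun row => row.set j "#")
      = gridOf H W (fun y x => q y x || (i == y && j == x)) := by
  unfold gridOf
  apply List.ext_getElem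
  · simp
  · intro y hy hy'
    simp only [List.getElem_modify, List.getElem_map, List.getElem_range] at *
    split
    · next h =>
        subst h
        apply List.ext_getElem
        · simp
        · intro x hx hx'
          simp only [List.getElem_set, List.getElem_map, List.getElem_range] at *
          split
          · next h2 => simp [h2]
          · next h2 =>
              have : (j == x) = false := by simp; omega
              simp [this]
    · next h =>
        have : (i == y) = false := by
          simp; omega
        simp [this]

lemma foldl_mark_gridOf (yOff xOff : Int) (H W : Nat)
    (ps : List (Int × Int)) (q : Nat → Nat → Bool)
    (hb : ∀ p ∈ ps, 0 ≤ p.2 + yOff ∧ (p.2 + yOff).toNat < H ∧ 0 ≤ p.1 + xOff ∧ (p.1 + xOff).toNat < W) :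
    ps.foldl (fun g p => g.modify (p.2 + yOff).toNat (fun row => row.set (p.1 + xOff).toNat "#")) (gridOf H W q)
      = gridOf H W (fun y x => q y x || ps.any (fun p => (p.2 + yOff).toNat == y && (p.1 + xOff).toNat == x)) := by
  induction ps generalizing q with
  | nil => simp [gridOf]
  | cons p t ih =>
      have hp := hb p (List.mem_cons_self ..)
      simp only [List.foldl_cons]
      rw [mark_gridOf H W q _ _ hp.2.1 hp.2.2.2,
          ih _ (fun p hp => hb p (List.mem_cons_of_mem _ hp))]
      unfold gridOf
      refine List.map_congr_left (fun y _ => List.map_congr_left (fun x _ => ?_))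
      simp only [List.any_cons, Bool.or_assoc]
      rfl

lemma main_eq (a : Int × Int) (l : List (Int × Int)) :
    toGrid (a :: l) = toGrid_alt (a :: l) := by
  set mX := (l.map Prod.fst).foldl min a.1 with hmXdef
  set MX := (l.map Prod.fst).foldl max a.1 with hMXdef
  set mY := (l.map Prod.snd).foldl min a.2 with hmYdef
  set MY := (l.map Prod.snd).foldl max a.2 with hMYdef
  have hmXle : mX ≤ a.1 := foldl_min_le_init _ _
  have hMXge : a.1 ≤ MX := init_le_foldl_max _ _
  have hmYle : mY ≤ a.2 := foldl_min_le_init _ _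
  have hMYge : a.2 ≤ MY := init_le_foldl_max _ _
  have hboundsAll : ∀ p ∈ a :: l, mX ≤ p.1 ∧ p.1 ≤ MX ∧ mY ≤ p.2 ∧ p.2 ≤ MY := by
    intro p hp
    rcases List.mem_cons.mp hp with rfl | hp
    · exact ⟨hmXle, hMXge, hmYle, hMYge⟩
    · exact ⟨foldl_min_le_of_mem _ _ _ (List.mem_map_of_mem hp),
             le_foldl_max_of_mem _ _ _ (List.mem_map_of_mem hp),
             foldl_min_le_of_mem _ _ _ (List.mem_map_of_mem hp),
             le_foldl_max_of_mem _ _ _ (List.mem_map_of_mem hp)⟩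
  have habsX : -|mX| ≤ mX := neg_abs_le mX
  have habsY : -|mY| ≤ mY := neg_abs_le mY
  have hmMX : mX ≤ MX := le_trans hmXle hMXge
  have hmMY : mY ≤ MY := le_trans hmYle hMYge
  set H := (MY + |mY| + 1).toNat with hHdef
  set W := (MX + |mX| + 1).toNat with hWdef
  have hH : MY + |mY| + 1 = (H : Int) := by rw [hHdef]; omega
  have hW : MX + |mX| + 1 = (W : Int) := by rw [hWdef]; omega
  have hGB : getBoundsA (a :: l) = ((some mX, some MX), (some mY, some MY)) := by
    unfold getBoundsA
    rw [getBoundsA_split]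
    simp only [List.map_cons, List.foldl_cons]
    rw [show updMinA none a.1 = some a.1 from rfl, show updMaxA none a.1 = some a.1 from rfl,
        show updMinA none a.2 = some a.2 from rfl, show updMaxA none a.2 = some a.2 from rfl,
        foldl_updMinA_some, foldl_updMaxA_some, foldl_updMinA_some, foldl_updMaxA_some]
  have h1 : PySem.List.min? ((a :: l).map Prod.fst) id = some mX := by
    rw [min?_eq_foldl_updMinA, List.map_cons, List.foldl_cons]
    exact foldl_updMinA_some _ _
  have h2 : PySem.List.max? ((a :: l).map Prod.fst) id = some MX := by
    rw [max?_eq_foldl_updMaxA, List.map_cons, List.foldl_cons]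
    exact foldl_updMaxA_some _ _
  have h3 : PySem.List.min? ((a :: l).map Prod.snd) id = some mY := by
    rw [min?_eq_foldl_updMinA, List.map_cons, List.foldl_cons]
    exact foldl_updMinA_some _ _
  have h4 : PySem.List.max? ((a :: l).map Prod.snd) id = some MY := by
    rw [max?_eq_foldl_updMaxA, List.map_cons, List.foldl_cons]
    exact foldl_updMaxA_some _ _
  have hbounds : ∀ p ∈ a :: l,
      0 ≤ p.2 + |mY| ∧ (p.2 + |mY|).toNat < H ∧ 0 ≤ p.1 + |mX| ∧ (p.1 + |mX|).toNat < W := by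
    intro p hp
    obtain ⟨b1, b2, b3, b4⟩ := hboundsAll p hp
    omega
  have hB : toGrid_alt (a :: l) =
      (a :: l).foldl (fun g p => g.modify (p.2 + |mY|).toNat (fun row => row.set (p.1 + |mX|).toNat "#"))
        (List.replicate H (List.replicate W ("." : String))) := by
    unfold toGrid_alt
    rw [h1, h2, h3, h4]
    simp only [List.isEmpty_cons, Bool.false_eq_true, if_false, Option.getD_some]
    rw [← hHdef, ← hWdef]
  rw [toGridA_eq_gridOf (a :: l) mX MX mY MY hGB H W hH hW, hB,
      replicate_eq_gridOf H W, foldl_mark_gridOf |mY| |mX| H W (a :: l) _ hbounds]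
  unfold gridOf
  refine List.map_congr_left (fun y hy => List.map_congr_left (fun x hx => ?_))
  have hyH : y < H := List.mem_range.mp hy
  have hxW : x < W := List.mem_range.mp hx
  have hcond : (pointsToDictA (a :: l)).contains ((x : Int) - |mX|, (y : Int) - |mY|)
      = (false || (a :: l).any (fun p => (p.2 + |mY|).toNat == y && (p.1 + |mX|).toNat == x)) := by
    unfold pointsToDictA
    rw [dict_contains_foldl]
    simp only [PySem.Dict.contains_empty, Bool.or_false, Bool.false_or]
    rw [Bool.eq_iff_iff]
    simp only [decide_eq_true_eq, List.any_eq_true, Bool.and_eq_true, beq_iff_eq]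
    constructor
    · intro hmem
      exact ⟨((x : Int) - |mX|, (y : Int) - |mY|), hmem, by omega, by omega⟩
    · rintro ⟨p, hp, hy2, hx2⟩
      obtain ⟨b1, b2, b3, b4⟩ := hboundsAll p hp
      have hpe : p = ((x : Int) - |mX|, (y : Int) - |mY|) := by
        rcases p with ⟨px, py⟩
        simp only at hy2 hx2 b1 b2 b3 b4
        have : px = (x : Int) - |mX| := by omega
        have : py = (y : Int) - |mY| := by omega
        simp_all
      exact hpe ▸ hp
  simp only [hcond]

-- ===== VERDICT (by name: the statement is the Claim_ definition above) =====
theorem toGrid_spec : Claim_equal_toGrid := by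
  intro points _hDom hPre
  unfold Spec_toGrid
  rcases points with _ | ⟨a, l⟩
  · exact absurd rfl hPre
  · exact main_eq a l
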